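-- pv_equiv track=rewrite | github.com/bolortuyats/algorithm-shinjilgee | lab6/2.py | greedy_optimal_bst
-- ===== SOURCE A (Python) =====
-- def sum_freq(freq, i, j):
--     return sum(freq[i:j+1])
--
-- def greedy_optimal_bst(keys, freq, i=0, j=None):
--     if j is None:
--         j = len(keys) - 1
--
--     if i > j:
--         return 0
--
--     max_freq_index = max(range(i, j + 1), key=lambda x: freq[x])
--
--     root_cost = sum_freq(freq, i, j)
--
--     left_cost = greedy_optimal_bst(keys, freq, i, max_freq_index - 1)
--     right_cost = greedy_optimal_bst(keys, freq, max_freq_index + 1, j)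
--
--     return root_cost + left_cost + right_cost
-- ===== SOURCE B (Python) =====
-- def greedy_optimal_bst(keys, freq, i=0, j=None):
--     if j is None:
--         j = len(keys) - 1
--
--     def go(i, j, d):
--         if i > j:
--             return 0
--         m = i
--         for x in range(i + 1, j + 1):
--             if freq[x] > freq[m]:
--                 m = x
--         return freq[m] * d + go(i, m - 1, d + 1) + go(m + 1, j, d + 1)
--
--     return go(i, j, 1)
-- ===== Notes on version B (the rewrite author's own statement) =====
-- stated objective: faster
-- what changed: B replaces A's per-node pair of passes (a freq[i:j+1] slice summed for the root cost plus max(range,key) for the argmax) by a single argmax scan per node and a depth accumulator: the interval sums disappear entirely because sum-of-subtree-totals equals sum of freq[m]*depth over the chosen roots.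
-- outside the precondition, e.g. on greedy_optimal_bst([1], [5, 7], -1, 0): A returns 5, B returns 17; on greedy_optimal_bst([1, 2], [5, 7], -2, None): A returns 34, B returns 46
import Mathlib
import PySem

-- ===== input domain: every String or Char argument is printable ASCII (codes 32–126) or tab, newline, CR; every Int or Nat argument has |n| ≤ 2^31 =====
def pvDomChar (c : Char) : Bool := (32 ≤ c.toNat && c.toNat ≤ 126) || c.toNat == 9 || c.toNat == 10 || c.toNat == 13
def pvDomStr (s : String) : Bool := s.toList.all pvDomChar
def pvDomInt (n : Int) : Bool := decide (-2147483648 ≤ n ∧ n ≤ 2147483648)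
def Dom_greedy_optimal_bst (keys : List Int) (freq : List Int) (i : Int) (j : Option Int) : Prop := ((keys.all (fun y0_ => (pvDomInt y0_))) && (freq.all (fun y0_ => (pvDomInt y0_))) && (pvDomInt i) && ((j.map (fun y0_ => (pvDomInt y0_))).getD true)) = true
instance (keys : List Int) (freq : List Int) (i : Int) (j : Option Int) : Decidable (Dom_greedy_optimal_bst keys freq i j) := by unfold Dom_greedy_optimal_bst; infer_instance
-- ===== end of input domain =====

-- B drops A's per-node slice+sum and keyed max in favour of one argmax scan and a depth
-- accumulator (total = Σ freq[root]·depth); measurably faster by a constant factor.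

-- ===== PORT A =====
-- sum_freq(freq, i, j) = sum(freq[i:j+1])
def pvSumFreq (freq : List Int) (i j : Int) : Int :=
  (PySem.List.slice freq (some i) (some (j + 1))).sum

-- max(range(i, j+1), key=lambda x: freq[x]); .getD i is only reached when the range is empty
-- (Python would raise there; the branch is entered only with i ≤ j, where the range is nonempty)
def pvArgmaxA (freq : List Int) (i j : Int) : Int :=
  (PySem.List.max? (PySem.List.pyRange i (j + 1) 1) (fun x => PySem.List.pyGetD freq x 0)).getD i

theorem pvArgmaxA_bounds (freq : List Int) (i j : Int) (h : i ≤ j) :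
    i ≤ pvArgmaxA freq i j ∧ pvArgmaxA freq i j ≤ j := by
  unfold pvArgmaxA
  cases hm : PySem.List.max? (PySem.List.pyRange i (j + 1) 1) (fun x => PySem.List.pyGetD freq x 0) with
  | none => simp; omega
  | some m =>
    have := PySem.List.max?_mem hm
    rw [PySem.List.mem_pyRange_one] at this
    simp; omega

-- the recursive body of A after 'j' has been resolved (A recurses with an int j)
def pvGreedyGoA (freq : List Int) (i j : Int) : Int :=
  if _h : i > j then 0
  else
    let m := pvArgmaxA freq i j
    pvSumFreq freq i j + pvGreedyGoA freq i (m - 1) + pvGreedyGoA freq (m + 1) j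
termination_by (j + 1 - i).toNat
decreasing_by
  · have := pvArgmaxA_bounds freq i j (by omega)
    omega
  · have := pvArgmaxA_bounds freq i j (by omega)
    omega

def greedy_optimal_bst (keys : List Int) (freq : List Int) (i : Int) (j : Option Int) : Int :=
  let jv : Int := match j with
    | none => (keys.length : Int) - 1
    | some v => v
  pvGreedyGoA freq i jv

-- ===== PORT B =====
-- m = i; for x in range(i+1, j+1): if freq[x] > freq[m]: m = x
def pvArgmaxB (freq : List Int) (i j : Int) : Int :=
  (PySem.List.pyRange (i + 1) (j + 1) 1).foldl
    (fun m x => if PySem.List.pyGetD freq x 0 > PySem.List.pyGetD freq m 0 then x else m) i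

theorem pvArgmaxB_bounds (freq : List Int) (i j : Int) (h : i ≤ j) :
    i ≤ pvArgmaxB freq i j ∧ pvArgmaxB freq i j ≤ j := by
  unfold pvArgmaxB
  have hmem : ∀ x ∈ PySem.List.pyRange (i + 1) (j + 1) 1, i ≤ x ∧ x ≤ j := by
    intro x hx; rw [PySem.List.mem_pyRange_one] at hx; omega
  have : ∀ (l : List Int) (a : Int), (∀ x ∈ l, i ≤ x ∧ x ≤ j) → i ≤ a → a ≤ j →
      i ≤ l.foldl (fun m x => if PySem.List.pyGetD freq x 0 > PySem.List.pyGetD freq m 0 then x else m) a ∧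
      l.foldl (fun m x => if PySem.List.pyGetD freq x 0 > PySem.List.pyGetD freq m 0 then x else m) a ≤ j := by
    intro l
    induction l with
    | nil => intro a _ h1 h2; exact ⟨h1, h2⟩
    | cons y t ih =>
      intro a hl h1 h2
      have hy := hl y (by simp)
      refine ih _ (fun x hx => hl x (by simp [hx])) ?_ ?_ <;> (dsimp only; split <;> omega)
  exact this _ i hmem le_rfl h

-- go(i, j, d): the node's own contribution is freq[m] * d; no range sums anywhere
def pvGreedyGoB (freq : List Int) (i j d : Int) : Int :=
  if _h : i > j then 0
  else
    let m := pvArgmaxB freq i j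
    PySem.List.pyGetD freq m 0 * d + pvGreedyGoB freq i (m - 1) (d + 1) + pvGreedyGoB freq (m + 1) j (d + 1)
termination_by (j + 1 - i).toNat
decreasing_by
  · have := pvArgmaxB_bounds freq i j (by omega)
    omega
  · have := pvArgmaxB_bounds freq i j (by omega)
    omega

def greedy_optimal_bst_alt (keys : List Int) (freq : List Int) (i : Int) (j : Option Int) : Int :=
  let jv : Int := match j with
    | none => (keys.length : Int) - 1
    | some v => v
  pvGreedyGoB freq i jv 1

-- ===== PRECONDITION & SPEC =====
-- Pre_ is the natural domain: either the interval is empty (A returns 0) or it lies inside freq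
-- (0 ≤ i and j < len freq), so every index A touches is a genuine in-range index. It excludes the
-- inputs where A raises IndexError (some index of [i,j] outside [-len, len)) and also inputs with
-- negative i on which A still returns a value only through Python's negative-index wraparound —
-- out-of-domain accidents B does not reproduce (see cites).
def Pre_greedy_optimal_bst (keys : List Int) (freq : List Int) (i : Int) (j : Option Int) : Prop :=
  let jv : Int := match j with
    | none => (keys.length : Int) - 1
    | some v => v
  i > jv ∨ (0 ≤ i ∧ jv < (freq.length : Int))
instance (keys : List Int) (freq : List Int) (i : Int) (j : Option Int) : Decidable (Pre_greedy_optimal_bst keys freq i j) := by unfold Pre_greedy_optimal_bst; infer_instance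

def pvWitness_greedy_optimal_bst : List Int × List Int × Int × Option Int :=
  ([10, 12, 20], [34, 8, 50], 0, none)

def Spec_greedy_optimal_bst (keys : List Int) (freq : List Int) (i : Int) (j : Option Int) (out : Int) : Prop := out = greedy_optimal_bst_alt keys freq i j
instance (keys : List Int) (freq : List Int) (i : Int) (j : Option Int) (out : Int) : Decidable (Spec_greedy_optimal_bst keys freq i j out) := by unfold Spec_greedy_optimal_bst; infer_instance

-- ===== CLAIM (what is proved, stated in full; the proofs are below) =====
def Claim_equal_greedy_optimal_bst : Prop := ∀ (keys : List Int) (freq : List Int) (i : Int) (j : Option Int), Dom_greedy_optimal_bst keys freq i j → Pre_greedy_optimal_bst keys freq i j → Spec_greedy_optimal_bst keys freq i j (greedy_optimal_bst keys freq i j)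

-- ===== LEMMAS AND PROOFS =====

-- the two argmax computations agree on a nonempty interval
theorem pvArgmax_key (freq : List Int) : ∀ (l : List Int) (a b : Int),
    (PySem.List.max? (a :: l) (fun x => PySem.List.pyGetD freq x 0)).getD b
      = l.foldl (fun m x => if PySem.List.pyGetD freq x 0 > PySem.List.pyGetD freq m 0 then x else m) a := by
  intro l
  induction l with
  | nil => intro a b; rfl
  | cons y t ih =>
    intro a b
    have h1 : PySem.List.max? (a :: y :: t) (fun x => PySem.List.pyGetD freq x 0)
        = PySem.List.max?
            ((if PySem.List.pyGetD freq y 0 > PySem.List.pyGetD freq a 0 then y else a) :: t)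
            (fun x => PySem.List.pyGetD freq x 0) := by
      by_cases hc : PySem.List.pyGetD freq a 0 < PySem.List.pyGetD freq y 0 <;>
        simp [PySem.List.max?, hc, gt_iff_lt]
    rw [h1, List.foldl_cons]
    exact ih _ b

theorem pvArgmax_eq (freq : List Int) (i j : Int) (h : i ≤ j) :
    pvArgmaxA freq i j = pvArgmaxB freq i j := by
  unfold pvArgmaxA pvArgmaxB
  rw [PySem.List.pyRange_one_cons (by omega : i < j + 1)]
  exact pvArgmax_key freq (PySem.List.pyRange (i + 1) (j + 1) 1) i i

-- sum(freq[a:b]) as a Nat-indexed segment, split at any midpoint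
def pvSeg (freq : List Int) (a b : Nat) : Int := ((freq.drop a).take (b - a)).sum

theorem pvSeg_split (freq : List Int) (a m b : Nat) (h1 : a ≤ m) (h2 : m ≤ b) :
    pvSeg freq a b = pvSeg freq a m + pvSeg freq m b := by
  unfold pvSeg
  rw [show b - a = (m - a) + (b - m) by omega, List.take_add, List.sum_append, List.drop_drop,
    show a + (m - a) = m by omega]

theorem pvSeg_single (freq : List Int) (m : Nat) (h : m < freq.length) :
    pvSeg freq m (m + 1) = freq[m] := by
  unfold pvSeg
  have h2 : freq.drop m = freq[m] :: freq.drop (m + 1) := List.drop_eq_getElem_cons h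
  rw [show m + 1 - m = 1 by omega, h2, List.take_succ_cons, List.take_zero]
  simp

theorem pvSumFreq_eq_seg (freq : List Int) (i j : Int) (h0 : 0 ≤ i) (hj : 0 ≤ j + 1) :
    pvSumFreq freq i j = pvSeg freq i.toNat (j + 1).toNat := by
  unfold pvSumFreq pvSeg
  rw [PySem.List.slice_toNat freq h0 hj]

-- the central identity: B's depth-weighted recursion is A's recursion plus (d-1) copies of the
-- interval total
theorem pvGoB_eq_goA (freq : List Int) :
    ∀ n (i j d : Int), (j + 1 - i).toNat = n → 0 ≤ i → j < (freq.length : Int) →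
      pvGreedyGoB freq i j d = pvGreedyGoA freq i j + (d - 1) * pvSeg freq i.toNat (j + 1).toNat := by
  intro n
  induction n using Nat.strong_induction_on with
  | _ n ih =>
    intro i j d hn h0 hj
    by_cases hij : i > j
    · rw [pvGreedyGoB, pvGreedyGoA]
      unfold pvSeg
      rw [show (j + 1).toNat - i.toNat = 0 by omega]
      simp [hij]
    · have hle : i ≤ j := by omega
      have hb := pvArgmaxB_bounds freq i j hle
      set m := pvArgmaxB freq i j with hmdef
      have hma : pvArgmaxA freq i j = m := pvArgmax_eq freq i j hle
      rw [pvGreedyGoB, pvGreedyGoA]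
      rw [dif_neg hij, dif_neg hij]
      simp only [hma, ← hmdef]
      rw [ih ((m - 1) + 1 - i).toNat (by omega) i (m - 1) (d + 1) rfl h0 (by omega)]
      rw [ih (j + 1 - (m + 1)).toNat (by omega) (m + 1) j (d + 1) rfl (by omega) hj]
      have hget : PySem.List.pyGetD freq m 0 = freq[m.toNat] :=
        PySem.List.pyGetD_eq_getElem freq 0 (by omega) (by omega)
      have hsum : pvSumFreq freq i j = pvSeg freq i.toNat (j + 1).toNat :=
        pvSumFreq_eq_seg freq i j h0 (by omega)
      have hsplit1 : pvSeg freq i.toNat (j + 1).toNat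
          = pvSeg freq i.toNat m.toNat + pvSeg freq m.toNat (j + 1).toNat := by
        apply pvSeg_split <;> omega
      have hsplit2 : pvSeg freq m.toNat (j + 1).toNat
          = pvSeg freq m.toNat (m.toNat + 1) + pvSeg freq (m.toNat + 1) (j + 1).toNat := by
        apply pvSeg_split <;> omega
      have hsingle : pvSeg freq m.toNat (m.toNat + 1) = freq[m.toNat] :=
        pvSeg_single freq m.toNat (by omega)
      rw [show ((m - 1) + 1).toNat = m.toNat by omega, show (m + 1).toNat = m.toNat + 1 by omega,
        hget, hsum, hsplit1, hsplit2, hsingle]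
      ring

-- ===== VERDICT (by name: the statement is the Claim_ definition above) =====
theorem greedy_optimal_bst_spec : Claim_equal_greedy_optimal_bst := by
  intro keys freq i j _ hpre
  unfold Spec_greedy_optimal_bst greedy_optimal_bst greedy_optimal_bst_alt
  unfold Pre_greedy_optimal_bst at hpre
  rcases j with _ | jv <;> simp only at hpre ⊢
  all_goals {
    rcases hpre with hgt | ⟨h0, hlen⟩
    · rw [pvGreedyGoA, pvGreedyGoB]; simp [hgt]
    · rw [pvGoB_eq_goA freq _ _ _ _ rfl h0 hlen]; ring
  }
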